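-- pv_equiv track=rewrite | github.com/jacksonbmitchusson/SecurityProject | detection.py | replace_equiv_chars
-- ===== SOURCE A (Python) =====
-- def replace_equiv_chars(s, char_equivs):
--     out = []
--     for i in range(len(s)):
--         out_char = s[i]
--         for pair in char_equivs:
--             if s[i] in pair[1]:
--                 out_char = pair[0]
--                 break
--         out.append(out_char)
--     return ''.join(out)
-- ===== SOURCE B (Python) =====
-- def replace_equiv_chars(s, char_equivs):
--     table = {}
--     for rep, cls in char_equivs:
--         for c in cls:
--             o = ord(c)
--             if o not in table:
--                 table[o] = rep
--     return s.translate(table)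
-- ===== Notes on version B (the rewrite author's own statement) =====
-- stated objective: idiomatic
-- what changed: Build a first-match-wins ord->representative dictionary once from char_equivs, then translate the whole string with a single s.translate(table) call, instead of scanning every pair's class string for every character of s.
import Mathlib
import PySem

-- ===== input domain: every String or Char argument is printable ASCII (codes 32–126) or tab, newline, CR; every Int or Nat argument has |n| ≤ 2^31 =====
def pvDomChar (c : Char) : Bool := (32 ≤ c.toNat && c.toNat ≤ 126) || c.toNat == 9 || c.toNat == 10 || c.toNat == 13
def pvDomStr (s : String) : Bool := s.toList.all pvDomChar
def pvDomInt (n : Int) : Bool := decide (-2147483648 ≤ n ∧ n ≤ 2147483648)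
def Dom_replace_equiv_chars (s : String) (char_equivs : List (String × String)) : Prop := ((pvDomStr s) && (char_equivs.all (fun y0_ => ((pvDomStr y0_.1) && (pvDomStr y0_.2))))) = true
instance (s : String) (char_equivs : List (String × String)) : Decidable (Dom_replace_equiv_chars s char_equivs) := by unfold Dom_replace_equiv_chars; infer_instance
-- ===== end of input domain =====

-- B replaces A's per-character scan of char_equivs by a first-wins translation table
-- (keyed by ord, built once) followed by a single str.translate pass (idiomatic rewrite).

-- ===== PORT A =====
-- inner loop of A: out_char = s[i]; for pair in char_equivs: if s[i] in pair[1]: out_char = pair[0]; break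
-- ('c in pair[1]' for a single char c is exactly membership of c among pair[1]'s characters)
def pvLoopA (c : Char) : List (String × String) → String
  | [] => String.ofList [c]
  | p :: rest => if p.2.toList.contains c then p.1 else pvLoopA c rest

def replace_equiv_chars (s : String) (char_equivs : List (String × String)) : String :=
  String.join (s.toList.map (fun c => pvLoopA c char_equivs))

-- ===== PORT B =====
-- table-building step for one pair (rep, cls): for c in cls: o = ord(c); if o not in table: table[o] = rep
def pvStepB (p : String × String) (d : PySem.Dict Nat String) : PySem.Dict Nat String :=
  p.2.toList.foldl (fun d c => if d.contains c.toNat then d else d.insert c.toNat p.1) d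

def pvTableB (char_equivs : List (String × String)) : PySem.Dict Nat String :=
  char_equivs.foldl (fun d p => pvStepB p d) PySem.Dict.empty

-- s.translate(table): each char is replaced by table[ord(c)] (a string) if present, kept otherwise
def replace_equiv_chars_alt (s : String) (char_equivs : List (String × String)) : String :=
  String.join (s.toList.map (fun c => (pvTableB char_equivs).getD c.toNat (String.ofList [c])))

-- ===== PRECONDITION & SPEC =====
def Spec_replace_equiv_chars (s : String) (char_equivs : List (String × String)) (out : String) : Prop := out = replace_equiv_chars_alt s char_equivs
instance (s : String) (char_equivs : List (String × String)) (out : String) : Decidable (Spec_replace_equiv_chars s char_equivs out) := by unfold Spec_replace_equiv_chars; infer_instance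

-- ===== CLAIM (what is proved, stated in full; the proofs are below) =====
def Claim_equal_replace_equiv_chars : Prop := ∀ (s : String) (char_equivs : List (String × String)), Dom_replace_equiv_chars s char_equivs → Spec_replace_equiv_chars s char_equivs (replace_equiv_chars s char_equivs)

-- ===== LEMMAS AND PROOFS =====

theorem pvToNat_inj (a b : Char) : a.toNat = b.toNat ↔ a = b :=
  ⟨fun h => by
      have := congrArg Char.ofNat h
      rwa [Char.ofNat_toNat, Char.ofNat_toNat] at this,
   fun h => h ▸ rfl⟩

-- first matching representative, as an Option (characterises both sides)
def pvFirst (c : Char) : List (String × String) → Option String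
  | [] => none
  | p :: rest => if p.2.toList.contains c then some p.1 else pvFirst c rest

theorem pvLoopA_eq_first (c : Char) (ps : List (String × String)) :
    pvLoopA c ps = (pvFirst c ps).getD (String.ofList [c]) := by
  induction ps with
  | nil => rfl
  | cons p rest ih =>
    simp only [pvLoopA, pvFirst]
    by_cases h : p.2.toList.contains c = true
    · rw [if_pos h, if_pos h]; rfl
    · rw [if_neg h, if_neg h, ih]

theorem get?_inner (rep : String) (c : Char) :
    ∀ (cls : List Char) (d : PySem.Dict Nat String),
      (cls.foldl (fun d c' => if d.contains c'.toNat then d else d.insert c'.toNat rep) d).get? c.toNat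
        = if d.contains c.toNat then d.get? c.toNat
          else if cls.contains c then some rep else none := by
  intro cls
  induction cls with
  | nil => intro d; by_cases h : d.contains c.toNat = true <;>
      simp [h, PySem.Dict.get?_eq_none_iff_contains]
  | cons c' rest ih =>
    intro d
    simp only [List.foldl_cons]
    by_cases hd : d.contains c'.toNat = true
    · rw [if_pos hd, ih d]
      by_cases hc : d.contains c.toNat = true
      · simp [hc]
      · have hne : ¬ (c = c') := by
          intro h; rw [h] at hc; exact hc hd
        simp [hc, hne]
    · rw [if_neg hd, ih (d.insert c'.toNat rep)]
      by_cases hc : c = c'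
      · subst hc
        simp [PySem.Dict.contains_insert_self, PySem.Dict.get?_insert_self, hd]
      · have hcn : ¬ (c.toNat = c'.toNat) := fun h => hc ((pvToNat_inj c c').mp h)
        have h1 : (d.insert c'.toNat rep).contains c.toNat = d.contains c.toNat := by
          rw [PySem.Dict.contains_insert]
          simp [hcn]
        rw [h1, PySem.Dict.get?_insert_of_ne d rep hcn]
        by_cases hdc : d.contains c.toNat = true
        · simp [hdc]
        · simp [hdc, hc]

theorem get?_table (c : Char) :
    ∀ (ps : List (String × String)) (d : PySem.Dict Nat String),
      (ps.foldl (fun d p => pvStepB p d) d).get? c.toNat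
        = if d.contains c.toNat then d.get? c.toNat else pvFirst c ps := by
  intro ps
  induction ps with
  | nil => intro d; by_cases h : d.contains c.toNat = true <;>
      simp [pvFirst, h, PySem.Dict.get?_eq_none_iff_contains]
  | cons p rest ih =>
    intro d
    simp only [List.foldl_cons]
    rw [ih (pvStepB p d)]
    have hs : (pvStepB p d).get? c.toNat
        = if d.contains c.toNat then d.get? c.toNat
          else if p.2.toList.contains c then some p.1 else none := by
      simpa [pvStepB] using get?_inner p.1 c p.2.toList d
    have hcontains : (pvStepB p d).contains c.toNat
        = (d.contains c.toNat || p.2.toList.contains c) := by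
      rw [PySem.Dict.contains_eq_isSome_get?, hs]
      by_cases h1 : d.contains c.toNat = true
      · simp [h1, ← PySem.Dict.contains_eq_isSome_get?]
      · by_cases h2 : p.2.toList.contains c = true <;> simp [List.contains_eq_mem] at * <;> simp [h1, h2]
    rw [hcontains, hs]
    by_cases h1 : d.contains c.toNat = true
    · simp [h1]
    · by_cases h2 : p.2.toList.contains c = true <;> simp [List.contains_eq_mem] at h2 <;> simp [pvFirst, h1, h2]

theorem per_char (c : Char) (ps : List (String × String)) :
    (pvTableB ps).getD c.toNat (String.ofList [c]) = pvLoopA c ps := by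
  rw [pvLoopA_eq_first, PySem.Dict.getD_eq_get?_getD, pvTableB, get?_table]
  simp [PySem.Dict.contains_empty]

-- ===== VERDICT (by name: the statement is the Claim_ definition above) =====
theorem replace_equiv_chars_spec : Claim_equal_replace_equiv_chars := by
  intro s ce _
  unfold Spec_replace_equiv_chars replace_equiv_chars replace_equiv_chars_alt
  congr 1
  exact List.map_congr_left (fun c _ => (per_char c ce).symm) |>.symm ▸ rfl
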